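-- pv_equiv track=rewrite | github.com/gigantemental/Python-Ejercicios | Ejercicios de Cadenas (Soluciones).py | cambiar2
-- ===== SOURCE A (Python) =====
-- def cambiar2(cad, car, rmax):
--     """DocString
--     """
--     if rmax == 0:
--         return cad
--     salida = ""
--     rep = 0
--     long = len(cad)
--     for i in range(long):
--         if cad[i] == " ":
--             salida += car
--             rep += 1
--             if rep == rmax:
--                 salida += cad[i+1:]
--                 break
--         else:
--             salida += cad[i]
--     return salida
-- ===== SOURCE B (Python) =====
-- def cambiar2(cad, car, rmax):
--     """Replace up to rmax spaces in cad with car (all spaces if rmax < 0)."""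
--     return car.join(cad.split(" ", rmax))
-- ===== Notes on version B (the rewrite author's own statement) =====
-- stated objective: idiomatic
-- what changed: The index loop with a replacement counter, per-character string concatenation and an early break is replaced by the one-line standard-library form car.join(cad.split(' ', rmax)), whose maxsplit argument gives exactly A's rmax semantics (0 = no replacement, negative = replace all).
import Mathlib
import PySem

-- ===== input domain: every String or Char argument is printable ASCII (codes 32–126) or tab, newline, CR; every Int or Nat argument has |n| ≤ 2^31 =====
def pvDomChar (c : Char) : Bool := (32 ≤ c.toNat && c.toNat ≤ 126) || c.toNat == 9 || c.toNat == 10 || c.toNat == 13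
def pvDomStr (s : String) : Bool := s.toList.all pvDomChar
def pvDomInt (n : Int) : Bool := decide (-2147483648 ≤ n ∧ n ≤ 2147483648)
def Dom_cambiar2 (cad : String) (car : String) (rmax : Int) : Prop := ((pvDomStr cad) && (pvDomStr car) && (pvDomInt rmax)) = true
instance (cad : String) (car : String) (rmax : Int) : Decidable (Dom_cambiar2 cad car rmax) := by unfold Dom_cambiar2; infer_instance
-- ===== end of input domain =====

-- B replaces A's index loop (counter, string concatenation, early break) by the
-- idiomatic car.join(cad.split(" ", rmax)); proved to return the same string on all inputs.


-- ===== PORT A =====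
-- the for-loop over i with break: structural recursion over the remaining characters
-- (cad[i] = head, cad[i+1:] = rest); salida/rep are the two loop variables
def cambiar2Go (car : List Char) (rmax : Int) : List Char → List Char → Int → List Char
  | [], salida, _ => salida
  | c :: rest, salida, rep =>
    if c = ' ' then
      if rep + 1 = rmax then (salida ++ car) ++ rest
      else cambiar2Go car rmax rest (salida ++ car) (rep + 1)
    else cambiar2Go car rmax rest (salida ++ [c]) rep

def cambiar2 (cad : String) (car : String) (rmax : Int) : String :=
  if rmax = 0 then cad
  else String.ofList (cambiar2Go car.toList rmax cad.toList [] 0)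

-- ===== PORT B =====
-- Source B: return car.join(cad.split(" ", rmax)); sep = " " is nonempty so split never gives None
def cambiar2_alt (cad : String) (car : String) (rmax : Int) : String :=
  PySem.Str.join car ((PySem.Str.splitMax? cad " " rmax).getD [])

-- ===== PRECONDITION & SPEC =====
def Spec_cambiar2 (cad : String) (car : String) (rmax : Int) (out : String) : Prop := out = cambiar2_alt cad car rmax
instance (cad : String) (car : String) (rmax : Int) (out : String) : Decidable (Spec_cambiar2 cad car rmax out) := by unfold Spec_cambiar2; infer_instance

-- ===== CLAIM (what is proved, stated in full; the proofs are below) =====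
def Claim_equal_cambiar2 : Prop := ∀ (cad : String) (car : String) (rmax : Int), Dom_cambiar2 cad car rmax → Spec_cambiar2 cad car rmax (cambiar2 cad car rmax)

-- ===== LEMMAS AND PROOFS =====

-- replace every space (the rmax < 0 behaviour)
def substRep (car : List Char) : List Char → List Char
  | [] => []
  | c :: rest => (if c = ' ' then car else [c]) ++ substRep car rest

-- replace the first m spaces, m ≥ 1 (the rmax > 0 behaviour)
def goA' (car : List Char) : List Char → Nat → List Char
  | [], _ => []
  | c :: rest, m =>
    if c = ' ' then car ++ (if m = 1 then rest else goA' car rest (m - 1))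
    else c :: goA' car rest m

-- join with separator car
def jn (car : List Char) : List (List Char) → List Char
  | [] => []
  | [x] => x
  | x :: y :: xs => x ++ car ++ jn car (y :: xs)

-- chunks produced by split(" ") (no limit) starting with partial token pre
def chunksN : List Char → List Char → List (List Char)
  | pre, [] => [pre]
  | pre, c :: rest => if c = ' ' then pre :: chunksN [] rest else chunksN (pre ++ [c]) rest

-- chunks produced by split(" ", m), m ≥ 1
def chunksM : List Char → Nat → List Char → List (List Char)
  | pre, _, [] => [pre]
  | pre, m, c :: rest =>
    if c = ' ' then (if m = 1 then [pre, rest] else pre :: chunksM [] (m - 1) rest)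
    else chunksM (pre ++ [c]) m rest

theorem jn_eq_intercalate (car : List Char) (xs : List (List Char)) :
    List.intercalate car xs = jn car xs := by
  induction xs with
  | nil => simp [jn, List.intercalate]
  | cons x xs ih =>
    cases xs with
    | nil => simp [jn, List.intercalate]
    | cons y ys =>
      simp only [jn]
      rw [← ih]
      simp [List.intercalate, List.intersperse]

theorem chunksN_ne_nil (pre l) : chunksN pre l ≠ [] := by
  induction l generalizing pre with
  | nil => simp [chunksN]
  | cons c rest ih => simp only [chunksN]; split_ifs <;> simp [ih]

theorem chunksM_ne_nil (pre m l) : chunksM pre m l ≠ [] := by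
  induction l generalizing pre m with
  | nil => simp [chunksM]
  | cons c rest ih => simp only [chunksM]; split_ifs <;> simp [ih]

theorem jn_cons_ne (car x) (xs : List (List Char)) (h : xs ≠ []) :
    jn car (x :: xs) = x ++ car ++ jn car xs := by
  cases xs with
  | nil => exact absurd rfl h
  | cons y ys => simp [jn]

theorem jn_chunksN (car pre l) : jn car (chunksN pre l) = pre ++ substRep car l := by
  induction l generalizing pre with
  | nil => simp [chunksN, jn, substRep]
  | cons c rest ih =>
    simp only [chunksN, substRep]
    split_ifs with h
    · rw [jn_cons_ne car pre _ (chunksN_ne_nil [] rest), ih]; simp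
    · rw [ih]; simp

theorem jn_chunksM (car pre m l) (hm : 1 ≤ m) :
    jn car (chunksM pre m l) = pre ++ goA' car l m := by
  induction l generalizing pre m with
  | nil => simp [chunksM, jn, goA']
  | cons c rest ih =>
    simp only [chunksM, goA']
    split_ifs with h h1
    · simp [jn]
    · rw [jn_cons_ne car pre _ (chunksM_ne_nil [] (m - 1) rest), ih [] (m - 1) (by omega)]
      simp
    · rw [ih _ m hm]; simp

-- ===== A-side lemmas =====

theorem cambiar2Go_append (car rmax l salida rep) :
    cambiar2Go car rmax l salida rep = salida ++ cambiar2Go car rmax l [] rep := by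
  induction l generalizing salida rep with
  | nil => simp [cambiar2Go]
  | cons c rest ih =>
    simp only [cambiar2Go]
    split_ifs with h h1
    · simp
    · rw [ih (salida ++ car), ih ([] ++ car)]; simp
    · rw [ih (salida ++ [c]), ih ([] ++ [c])]; simp

theorem cambiar2Go_neg (car : List Char) (rmax : Int) (hneg : rmax < 0) (l : List Char)
    (rep : Int) (hrep : 0 ≤ rep) :
    cambiar2Go car rmax l [] rep = substRep car l := by
  induction l generalizing rep with
  | nil => simp [cambiar2Go, substRep]
  | cons c rest ih =>
    simp only [cambiar2Go, substRep]
    split_ifs with h h1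
    · omega
    · rw [cambiar2Go_append, ih (rep + 1) (by omega)]; simp
    · rw [cambiar2Go_append, ih rep hrep]; simp

theorem cambiar2Go_pos (car : List Char) (rmax : Int) (_hpos : 0 < rmax) (l : List Char)
    (rep : Int) (h0 : 0 ≤ rep) (hlt : rep < rmax) :
    cambiar2Go car rmax l [] rep = goA' car l (rmax - rep).toNat := by
  induction l generalizing rep with
  | nil => simp [cambiar2Go, goA']
  | cons c rest ih =>
    simp only [cambiar2Go, goA']
    split_ifs with h h1 h2
    · simp
    · omega
    · omega
    · rw [cambiar2Go_append, ih (rep + 1) (by omega) (by omega)]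
      have : (rmax - (rep + 1)).toNat = (rmax - rep).toNat - 1 := by omega
      rw [this]; simp
    · rw [cambiar2Go_append, ih rep h0 hlt]; simp

-- ===== B-side lemmas: the PySem fuel-based split =====

theorem goM_zero (sep : List Char) (f : Nat) (l cur : List Char) (acc : List (List Char)) :
    PySem.Chars.splitOnMax.go sep f 0 l cur acc = ((cur.reverse ++ l) :: acc).reverse := by
  cases f with
  | zero => simp [PySem.Chars.splitOnMax.go]
  | succ f => cases l <;> simp [PySem.Chars.splitOnMax.go]

theorem goM_acc (sep : List Char) (f : Nat) (m : Nat) (l cur : List Char)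
    (acc : List (List Char)) :
    PySem.Chars.splitOnMax.go sep f m l cur acc =
      acc.reverse ++ PySem.Chars.splitOnMax.go sep f m l cur [] := by
  induction f generalizing m l cur acc with
  | zero => simp [PySem.Chars.splitOnMax.go]
  | succ f ih =>
    cases l with
    | nil => simp [PySem.Chars.splitOnMax.go]
    | cons c rest =>
      simp only [PySem.Chars.splitOnMax.go]
      split_ifs with h h1
      · simp
      · rw [ih (m - 1) _ [] (cur.reverse :: acc), ih (m - 1) _ [] [cur.reverse]]; simp
      · rw [ih m rest (c :: cur) acc, ih m rest (c :: cur) []]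

theorem goN_acc (sep : List Char) (f : Nat) (l cur : List Char) (acc : List (List Char)) :
    PySem.Chars.splitOn.go sep f l cur acc =
      acc.reverse ++ PySem.Chars.splitOn.go sep f l cur [] := by
  induction f generalizing l cur acc with
  | zero => simp [PySem.Chars.splitOn.go]
  | succ f ih =>
    cases l with
    | nil => simp [PySem.Chars.splitOn.go]
    | cons c rest =>
      simp only [PySem.Chars.splitOn.go]
      split_ifs with h
      · rw [ih _ [] (cur.reverse :: acc), ih _ [] [cur.reverse]]; simp
      · rw [ih rest (c :: cur) acc, ih rest (c :: cur) []]

theorem space_isPrefixOf (c : Char) (rest : List Char) :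
    [' '].isPrefixOf (c :: rest) = (c = ' ') := by
  by_cases h : c = ' ' <;> simp [List.isPrefixOf, h]
  intro h'
  exact h h'.symm

theorem goN_chunks (f : Nat) (l cur : List Char) (hf : l.length ≤ f) :
    PySem.Chars.splitOn.go [' '] f l cur [] = chunksN cur.reverse l := by
  induction f generalizing l cur with
  | zero =>
    have : l = [] := by cases l <;> simp_all
    subst this; simp [PySem.Chars.splitOn.go, chunksN]
  | succ f ih =>
    cases l with
    | nil => simp [PySem.Chars.splitOn.go, chunksN]
    | cons c rest =>
      simp only [PySem.Chars.splitOn.go, chunksN]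
      simp only [space_isPrefixOf, List.length_singleton, List.drop_succ_cons, List.drop_zero]
      split_ifs with h
      · rw [goN_acc, ih rest [] (by simp at hf ⊢; omega)]
        subst h; simp
      · rw [ih rest (c :: cur) (by simp at hf ⊢; omega)]
        simp

theorem goM_chunks (f m : Nat) (l cur : List Char) (hf : l.length ≤ f) (hm : 1 ≤ m) :
    PySem.Chars.splitOnMax.go [' '] f m l cur [] = chunksM cur.reverse m l := by
  induction f generalizing l cur m with
  | zero =>
    have : l = [] := by cases l <;> simp_all
    subst this; simp [PySem.Chars.splitOnMax.go, chunksM]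
  | succ f ih =>
    cases l with
    | nil => simp [PySem.Chars.splitOnMax.go, chunksM]
    | cons c rest =>
      simp only [PySem.Chars.splitOnMax.go, chunksM]
      simp only [space_isPrefixOf, List.length_singleton, List.drop_succ_cons, List.drop_zero]
      have hm0 : ¬ m = 0 := by omega
      split_ifs with h h1
      · -- space, m = 1 : next call has m - 1 = 0
        rw [goM_acc, h1]
        rw [goM_zero]
        subst h; simp
      · -- space, m > 1
        rw [goM_acc, ih (m - 1) rest [] (by simp at hf ⊢; omega) (by omega)]
        subst h; simp
      · rw [ih m rest (c :: cur) (by simp at hf ⊢; omega) hm]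
        simp

-- assembling B's value
theorem alt_eval (cad car : String) (rmax : Int) :
    cambiar2_alt cad car rmax =
      String.ofList (jn car.toList
        (PySem.Chars.splitOnMax cad.toList [' '] rmax)) := by
  unfold cambiar2_alt
  simp only [PySem.Str.splitMax?, PySem.Chars.splitMax?]
  have : (" ".toList) = [' '] := by decide
  rw [this]
  simp [PySem.Str.join, PySem.Chars.join, jn_eq_intercalate, Function.comp_def,
        List.map_map, String.toList_ofList]

-- ===== VERDICT (by name: the statement is the Claim_ definition above) =====
theorem cambiar2_spec : Claim_equal_cambiar2 := by
  unfold Claim_equal_cambiar2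
  intro cad car rmax _
  unfold Spec_cambiar2
  rw [alt_eval]
  unfold cambiar2 PySem.Chars.splitOnMax
  rcases lt_trichotomy rmax 0 with hneg | h0 | hpos
  · -- rmax < 0 : all spaces replaced
    rw [if_neg (by omega), if_pos hneg]
    unfold PySem.Chars.splitOn
    rw [goN_chunks _ _ [] (by omega)]
    simp only [List.reverse_nil]
    rw [jn_chunksN]
    rw [cambiar2Go_neg car.toList rmax hneg cad.toList 0 le_rfl]
    simp
  · -- rmax = 0 : A returns cad; split(" ", 0) = [cad], so the join is cad as well
    subst h0
    rw [if_pos rfl, if_neg (by omega)]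
    rw [show ((0 : Int)).toNat = 0 from rfl, goM_zero]
    simp [jn, String.ofList_toList]
  · -- rmax > 0 : the first rmax spaces replaced
    rw [if_neg (by omega), if_neg (by omega)]
    rw [goM_chunks _ _ _ [] (by omega) (by omega)]
    simp only [List.reverse_nil]
    rw [jn_chunksM _ _ _ _ (by omega)]
    rw [cambiar2Go_pos car.toList rmax hpos cad.toList 0 le_rfl hpos]
    simp
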